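-- pv_equiv track=rewrite | github.com/Rathgrith/SalientAttack | core/utils/utility.py | map_possibility_to_rank
-- ===== SOURCE A (Python) =====
-- def map_possibility_to_rank(possibility_list):
--     possibility_list: list
--     sorted_list = sorted(possibility_list)
--     mapping_dict = {}
--     rank = 0
--     for possibility in sorted_list:
--         if possibility not in mapping_dict:
--             mapping_dict[possibility] = rank
--         rank += 1
--     possibility_list_copy = [0 for i in range(len(possibility_list))]
--     for index in range(len(possibility_list)):
--         possibility_list_copy[index] = mapping_dict[possibility_list[index]]
--     return possibility_list_copy
-- ===== SOURCE B (Python) =====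
-- def map_possibility_to_rank(possibility_list):
--     counts = {}
--     for x in possibility_list:
--         counts[x] = counts.get(x, 0) + 1
--     mapping = {}
--     rank = 0
--     for value in sorted(counts):
--         mapping[value] = rank
--         rank += counts[value]
--     return [mapping[x] for x in possibility_list]
-- ===== Notes on version B (the rewrite author's own statement) =====
-- stated objective: alternative
-- what changed: Instead of walking every element of the sorted list and recording first-occurrence indices, B counts multiplicities once and does a prefix-sum of counts over the sorted distinct values; it trades the per-element sorted walk for a per-distinct-value rank loop at similar overall cost.
import Mathlib
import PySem

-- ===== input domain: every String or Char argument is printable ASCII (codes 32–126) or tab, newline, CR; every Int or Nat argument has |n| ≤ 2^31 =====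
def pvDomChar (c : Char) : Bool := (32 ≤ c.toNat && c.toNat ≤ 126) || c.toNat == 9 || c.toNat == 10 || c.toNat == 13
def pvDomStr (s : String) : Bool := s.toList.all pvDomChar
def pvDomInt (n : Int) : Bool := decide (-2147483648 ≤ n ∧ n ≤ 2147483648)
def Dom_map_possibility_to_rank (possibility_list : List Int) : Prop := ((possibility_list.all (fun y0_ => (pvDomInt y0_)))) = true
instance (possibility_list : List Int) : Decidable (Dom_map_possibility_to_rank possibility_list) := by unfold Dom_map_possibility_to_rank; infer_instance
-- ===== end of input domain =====

-- B computes the same ranks by a different route: a counting dict plus a prefix-sum of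
-- multiplicities over the sorted distinct values, instead of A's per-element walk over
-- the whole sorted list (alternative structure, similar cost).


-- ===== PORT A =====
-- Literal port of A. `mapping_dict[possibility_list[index]]` can never raise (every
-- element occurs in the sorted list), so the `.getD 0` default is never taken; `pyGetD`
-- likewise only sees in-range indices from `range(len(...))`.
def map_possibility_to_rank (possibility_list : List Int) : List Int :=
  let sorted_list := PySem.List.sorted possibility_list (fun x => x) false
  let st := sorted_list.foldl
    (fun (st : PySem.Dict Int Int × Int) possibility =>
      (if st.1.contains possibility then st.1 else st.1.insert possibility st.2, st.2 + 1))
    (PySem.Dict.empty, 0)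
  let copy0 := (PySem.List.pyRange 0 (possibility_list.length : Int) 1).map (fun _ => (0 : Int))
  (PySem.List.pyRange 0 (possibility_list.length : Int) 1).foldl
    (fun c i =>
      PySem.List.pySetD c i ((st.1.get? (PySem.List.pyGetD possibility_list i 0)).getD 0))
    copy0

-- ===== PORT B =====
-- Literal port of Source B. `mapping[x]` can never raise (every element of the list is a
-- key of `counts`, hence of `mapping`), so the `.getD 0` default is never taken.
def map_possibility_to_rank_alt (possibility_list : List Int) : List Int :=
  let counts := possibility_list.foldl (fun d x => d.insert x (d.getD x 0 + 1)) PySem.Dict.empty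
  let st := (PySem.List.sorted counts.keys (fun v => v) false).foldl
    (fun (st : PySem.Dict Int Int × Int) v => (st.1.insert v st.2, st.2 + counts.getD v 0))
    (PySem.Dict.empty, 0)
  possibility_list.map (fun x => (st.1.get? x).getD 0)

-- ===== PRECONDITION & SPEC =====
def Spec_map_possibility_to_rank (possibility_list : List Int) (out : List Int) : Prop := out = map_possibility_to_rank_alt possibility_list
instance (possibility_list : List Int) (out : List Int) : Decidable (Spec_map_possibility_to_rank possibility_list out) := by unfold Spec_map_possibility_to_rank; infer_instance

-- ===== CLAIM (what is proved, stated in full; the proofs are below) =====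
def Claim_equal_map_possibility_to_rank : Prop := ∀ (possibility_list : List Int), Dom_map_possibility_to_rank possibility_list → Spec_map_possibility_to_rank possibility_list (map_possibility_to_rank possibility_list)

-- ===== LEMMAS AND PROOFS =====

-- A's first loop: on a (≤)-sorted list, a key's recorded rank is the number of
-- strictly smaller elements (offset by the starting rank).
theorem aloop_get (ys : List Int) (hs : ys.Pairwise (· ≤ ·)) :
    ∀ (d : PySem.Dict Int Int) (r x : Int),
      ((ys.foldl
        (fun (st : PySem.Dict Int Int × Int) y =>
          (if st.1.contains y then st.1 else st.1.insert y st.2, st.2 + 1)) (d, r)).1).get? x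
      = if x ∈ ys ∧ d.get? x = none
          then some (r + (ys.countP (fun y => decide (y < x)) : Int))
          else d.get? x := by
  induction ys with
  | nil => intro d r x; simp
  | cons y t ih =>
    intro d r x
    obtain ⟨hy, ht⟩ := List.pairwise_cons.mp hs
    rw [List.foldl_cons, ih ht]
    by_cases hxy : x = y
    · subst hxy
      rcases hdx : d.get? x with _ | v
      · have hc : d.contains x = false := by
          rw [PySem.Dict.contains_eq_isSome_get?, hdx]; rfl
        have hins : (d.insert x r).get? x = some r := PySem.Dict.get?_insert_self d x r
        have hcnt : t.countP (fun y => decide (y < x)) = 0 :=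
          List.countP_eq_zero.mpr (fun z hz => by simpa using not_lt.mpr (hy z hz))
        simp [hc, hins, hcnt]
      · have hc : d.contains x = true := by
          rw [PySem.Dict.contains_eq_isSome_get?, hdx]; rfl
        simp [hc, hdx]
    · have hget : (if d.contains y then d else d.insert y r).get? x = d.get? x := by
        split
        · rfl
        · exact PySem.Dict.get?_insert_of_ne d r hxy
      rw [hget]
      by_cases hxt : x ∈ t
      · have hlt : y < x := lt_of_le_of_ne (hy x hxt) (Ne.symm hxy)
        by_cases hdx : d.get? x = none
        · simp [hxt, hdx, hxy, hlt]
          ring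
        · simp [hxt, hdx, hxy]
      · simp [hxt, hxy]

-- B's rank loop: on a strictly increasing list, a key's recorded rank is the starting
-- rank plus the counts of all smaller keys.
theorem bloop_get (zs : List Int) (hs : zs.Pairwise (· < ·)) (cnt : Int → Int) :
    ∀ (m : PySem.Dict Int Int) (r x : Int),
      ((zs.foldl
        (fun (st : PySem.Dict Int Int × Int) v => (st.1.insert v st.2, st.2 + cnt v)) (m, r)).1).get? x
      = if x ∈ zs
          then some (r + (zs.map (fun z => if z < x then cnt z else 0)).sum)
          else m.get? x := by
  induction zs with
  | nil => intro m r x; simp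
  | cons z t ih =>
    intro m r x
    obtain ⟨hz, ht⟩ := List.pairwise_cons.mp hs
    rw [List.foldl_cons, ih ht]
    by_cases hxz : x = z
    · subst hxz
      have hxt : x ∉ t := fun h => absurd rfl (ne_of_gt (hz x h))
      have hsum : (t.map (fun z => if z < x then cnt z else 0)).sum = 0 :=
        List.sum_eq_zero (by
          intro a ha
          obtain ⟨z', hz', hz'e⟩ := List.mem_map.mp ha
          simp [not_lt.mpr (le_of_lt (hz z' hz'))] at hz'e
          omega)
      simp [hxt, PySem.Dict.get?_insert_self, hsum]
    · rw [PySem.Dict.get?_insert_of_ne m r hxz]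
      by_cases hxt : x ∈ t
      · have hlt : z < x := hz x hxt
        simp [hxt, hxz, hlt]
        ring
      · simp [hxt, hxz]

-- Splitting a countP at one value: occurrences of z contribute count z (if z < x).
theorem countP_split (l : List Int) (z x : Int) :
    l.countP (fun y => decide (y < x))
      = (if z < x then l.count z else 0)
        + (l.filter (fun y => decide (y ≠ z))).countP (fun y => decide (y < x)) := by
  induction l with
  | nil => simp
  | cons a l ih =>
    by_cases haz : a = z
    · subst haz
      by_cases hax : a < x
      all_goals (simp [hax, ih]; try omega)
    · by_cases hax : a < x
      all_goals (simp [haz, hax, ih]; try (split <;> omega))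

-- The prefix-sum of counts over any duplicate-free cover of l is l's countP.
theorem sum_ite_count (zs : List Int) (x : Int) :
    ∀ (l : List Int), zs.Nodup → (∀ a ∈ l, a ∈ zs) →
      (zs.map (fun z => if z < x then (l.count z : Int) else 0)).sum
        = (l.countP (fun y => decide (y < x)) : Int) := by
  induction zs with
  | nil =>
    intro l _ hsub
    have : l = [] := List.eq_nil_iff_forall_not_mem.mpr (fun a ha => by simpa using hsub a ha)
    simp [this]
  | cons z t ih =>
    intro l hnd hsub
    obtain ⟨hzt, hndt⟩ := List.nodup_cons.mp hnd
    set l' := l.filter (fun y => decide (y ≠ z)) with hl'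
    have hmapeq : t.map (fun z' => if z' < x then (l.count z' : Int) else 0)
        = t.map (fun z' => if z' < x then (l'.count z' : Int) else 0) := by
      apply List.map_congr_left
      intro z' hz'
      have hne : z' ≠ z := fun h => hzt (h ▸ hz')
      have : l'.count z' = l.count z' := List.count_filter (by simpa using hne)
      rw [this]
    have hsub' : ∀ a ∈ l', a ∈ t := by
      intro a ha
      obtain ⟨hal, haz⟩ := List.mem_filter.mp ha
      have := hsub a hal
      simp at haz
      simpa [haz] using this
    rw [List.map_cons, List.sum_cons, hmapeq, ih l' hndt hsub', countP_split l z x]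
    push_cast
    split <;> ring

-- The common value: both programs map x to the number of elements of the list below x.
theorem a_eq_rankmap (pl : List Int) :
    map_possibility_to_rank pl
      = pl.map (fun x => (pl.countP (fun y => decide (y < x)) : Int)) := by
  unfold map_possibility_to_rank
  simp only []
  set ys := PySem.List.sorted pl (fun x => x) false with hys
  set g : Int → Int := fun x =>
    (((ys.foldl (fun (st : PySem.Dict Int Int × Int) y =>
        (if st.1.contains y then st.1 else st.1.insert y st.2, st.2 + 1))
      (PySem.Dict.empty, 0)).1).get? x).getD 0 with hg
  -- the write loop over range(len) fills position i with g (pl[i])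
  have hwrite : ∀ (k : Nat), k ≤ pl.length → ∀ (c : List Int), c.length = pl.length →
      (PySem.List.pyRange 0 (k : Int) 1).foldl
        (fun c i => PySem.List.pySetD c i ((let st := ys.foldl (fun (st : PySem.Dict Int Int × Int) y =>
            (if st.1.contains y then st.1 else st.1.insert y st.2, st.2 + 1)) (PySem.Dict.empty, 0);
          st.1.get? (PySem.List.pyGetD pl i 0)).getD 0)) c
      = (pl.take k).map g ++ c.drop k := by
    intro k
    induction k with
    | zero => intro _ c _; simp
    | succ k ih =>
      intro hk c hc
      have hk' : k ≤ pl.length := Nat.le_of_succ_le hk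
      have hkl : k < pl.length := hk
      have hrange : PySem.List.pyRange 0 ((k : Int) + 1) 1
          = PySem.List.pyRange 0 (k : Int) 1 ++ [(k : Int)] :=
        PySem.List.pyRange_one_succ_right (by positivity)
      have hcast : ((k + 1 : Nat) : Int) = (k : Int) + 1 := by push_cast; ring
      rw [hcast, hrange, List.foldl_append, ih hk' c hc]
      simp only [List.foldl_cons, List.foldl_nil]
      have hgetk : PySem.List.pyGetD pl (k : Int) 0 = pl[k] := by
        simp [PySem.List.pyGetD_natCast, List.getD_eq_getElem?_getD, hkl]
      rw [hgetk, PySem.List.pySetD_natCast]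
      have hlen : ((pl.take k).map g).length = k := by
        simp [Nat.min_eq_left hk']
      rw [List.set_append_right _ _ hlen.le, hlen, Nat.sub_self,
        List.drop_eq_getElem_cons (show k < c.length by omega), List.set_cons_zero,
        List.take_add_one, List.getElem?_eq_getElem hkl]
      simp only [hg]
      simp
      rw [List.take_add_one, List.getElem?_eq_getElem (by simpa using hkl)]
      simp
  have hres := hwrite pl.length le_rfl
    ((PySem.List.pyRange 0 (pl.length : Int) 1).map (fun _ => (0 : Int)))
    (by simp [PySem.List.pyRange_zero_natCast])
  rw [hres, List.take_length,
    List.drop_eq_nil_of_le (by simp [PySem.List.pyRange_zero_natCast]), List.append_nil]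
  apply List.map_congr_left
  intro x hx
  have hs : ys.Pairwise (· ≤ ·) := PySem.List.sorted_pairwise pl (fun x => x)
  have hxy : x ∈ ys := (PySem.List.mem_sorted pl _ false x).mpr hx
  have hperm : ys.Perm pl := PySem.List.sorted_perm pl (fun x => x) false
  rw [hg]
  simp only [aloop_get ys hs PySem.Dict.empty 0 x]
  simp [hxy, PySem.Dict.get?_empty, hperm.countP_eq]

theorem b_eq_rankmap (pl : List Int) :
    map_possibility_to_rank_alt pl
      = pl.map (fun x => (pl.countP (fun y => decide (y < x)) : Int)) := by
  unfold map_possibility_to_rank_alt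
  simp only [PySem.Dict.foldl_insert_getD_add_one_eq_counter, PySem.Dict.keys_counter]
  apply List.map_congr_left
  intro x hx
  set zs := PySem.List.sorted (PySem.Set.ofList pl) (fun v => v) false with hzs
  have hslt : zs.Pairwise (· < ·) := PySem.List.sorted_ofList_pairwise_lt pl
  have hnd : zs.Nodup := hslt.imp ne_of_lt
  have hxz : x ∈ zs := by
    rw [hzs, PySem.List.mem_sorted, PySem.Set.mem_ofList]; exact hx
  have hsub : ∀ a ∈ pl, a ∈ zs := by
    intro a ha
    rw [hzs, PySem.List.mem_sorted, PySem.Set.mem_ofList]; exact ha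
  simp only [bloop_get zs hslt (fun v => (PySem.Dict.counter pl).getD v 0) PySem.Dict.empty 0 x]
  have hcnteq : zs.map (fun z => if z < x then (PySem.Dict.counter pl).getD z 0 else 0)
      = zs.map (fun z => if z < x then (pl.count z : Int) else 0) := by
    apply List.map_congr_left
    intro z _
    rw [PySem.Dict.getD_counter]
  rw [if_pos hxz, hcnteq, sum_ite_count zs x pl hnd hsub]
  simp

-- ===== VERDICT (by name: the statement is the Claim_ definition above) =====
theorem map_possibility_to_rank_spec : Claim_equal_map_possibility_to_rank := by
  intro pl _
  unfold Spec_map_possibility_to_rank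
  rw [a_eq_rankmap, b_eq_rankmap]
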